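-- pv_equiv track=rewrite | github.com/cvs473/DLab_task5 | sha1.py | sha1
-- ===== SOURCE A (Python) =====
-- def sha1(data):
--     mask = 0xFFFFFFFF
--     bytes = ""
--     h0 = 0x67452301
--     h1 = 0xEFCDAB89
--     h2 = 0x98BADCFE
--     h3 = 0x10325476
--     h4 = 0xC3D2E1F0
--
--     def lrot(n, b):
--         return ((n << b) | (n >> (32 - b))) & mask
--
--     for n in range(len(data)):
--         bytes+='{0:08b}'.format(ord(data[n]))
--     bits = bytes + "1"
--     pBits = bits
--     while len(pBits)%512 != 448:
--         pBits+="0"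
--     pBits+='{0:064b}'.format(len(bits)-1)
--
--     def chunks(l, n):
--         return [l[i:i+n] for i in range(0, len(l), n)]
--
--     for ch in chunks(pBits, 512):
--         words = chunks(ch, 32)
--         w = [0]*80
--         for n in range(0, 16):
--             w[n] = int(words[n], 2)
--         for i in range(16, 80):
--             w[i] = lrot((w[i-3] ^ w[i-8] ^ w[i-14] ^ w[i-16]), 1)
--
--         a, b, c, d, e = h0, h1, h2, h3, h4
--
--         for i in range(0, 80):
--             if 0 <= i <= 19:
--                 f = (b & c) | ((~b) & d)
--                 k = 0x5A827999
--             elif 20 <= i <= 39: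
--                 f = b ^ c ^ d
--                 k = 0x6ED9EBA1
--             elif 40 <= i <= 59:
--                 f = (b & c) | (b & d) | (c & d)
--                 k = 0x8F1BBCDC
--             elif 60 <= i <= 79:
--                 f = b ^ c ^ d
--                 k = 0xCA62C1D6
--
--
--             a, b, c, d, e = lrot(a, 5) + f + e + k + w[i] & mask, a, lrot(b, 30), c, d
--
--
--         h0 = h0 + a & mask
--         h1 = h1 + b & mask
--         h2 = h2 + c & mask
--         h3 = h3 + d & mask
--         h4 = h4 + e & mask
--
--     return '%08x%08x%08x%08x%08x' % (h0, h1, h2, h3, h4)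
-- ===== SOURCE B (Python) =====
-- def sha1(data):
--     M = 0xFFFFFFFF
--
--     def rol(x, s):
--         return ((x << s) | (x >> (32 - s))) & M
--
--     # pack the whole message into one big integer, 8 bits per character
--     L = len(data)
--     n = 0
--     for c in data:
--         n = (n << 8) | ord(c)
--     # append the '1' bit, zero-pad to 448 mod 512, append the 64-bit bit length
--     z = (447 - 8 * L) % 512
--     padded = (((n << 1) | 1) << (z + 64)) | (8 * L & ((1 << 64) - 1))
--     blocks = (8 * L + 1 + z + 64) // 512
--
--     h = [0x67452301, 0xEFCDAB89, 0x98BADCFE, 0x10325476, 0xC3D2E1F0]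
--     for i in range(blocks - 1, -1, -1):
--         chunk = (padded >> (512 * i)) & ((1 << 512) - 1)
--         w = [(chunk >> (480 - 32 * t)) & M for t in range(16)]
--         for t in range(16, 80):
--             w.append(rol(w[t - 3] ^ w[t - 8] ^ w[t - 14] ^ w[t - 16], 1))
--         a, b, c, d, e = h
--         t = 0
--         for f, k in (
--             (lambda x, y, zz: (x & y) | (~x & zz), 0x5A827999),
--             (lambda x, y, zz: x ^ y ^ zz, 0x6ED9EBA1),
--             (lambda x, y, zz: (x & y) | (x & zz) | (y & zz), 0x8F1BBCDC),
--             (lambda x, y, zz: x ^ y ^ zz, 0xCA62C1D6),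
--         ):
--             for _ in range(20):
--                 a, b, c, d, e = (rol(a, 5) + f(b, c, d) + e + k + w[t]) & M, a, rol(b, 30), c, d
--                 t += 1
--         h = [(u + v) & M for u, v in zip(h, (a, b, c, d, e))]
--     return '%040x' % (h[0] << 128 | h[1] << 96 | h[2] << 64 | h[3] << 32 | h[4])
-- ===== Notes on version B (the rewrite author's own statement) =====
-- stated objective: alternative
-- what changed: Replaces A's bit-string pipeline (per-character 08b-format concatenation of zero/one characters, a while-loop appending padding characters, slice-based chunking and int(s,2) word parsing) with big-integer arithmetic: the message is packed into one integer, padded by shifts/ors computed in closed form, chunks and the 16 words are extracted with shifts and masks, the digest registers live in a 5-element list updated by zip, the 80 rounds run as four 20-round segments driven by a table of (f,k) pairs, and the result is printed as a single 40-digit hex format of the combined 160-bit value; …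
import Mathlib
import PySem

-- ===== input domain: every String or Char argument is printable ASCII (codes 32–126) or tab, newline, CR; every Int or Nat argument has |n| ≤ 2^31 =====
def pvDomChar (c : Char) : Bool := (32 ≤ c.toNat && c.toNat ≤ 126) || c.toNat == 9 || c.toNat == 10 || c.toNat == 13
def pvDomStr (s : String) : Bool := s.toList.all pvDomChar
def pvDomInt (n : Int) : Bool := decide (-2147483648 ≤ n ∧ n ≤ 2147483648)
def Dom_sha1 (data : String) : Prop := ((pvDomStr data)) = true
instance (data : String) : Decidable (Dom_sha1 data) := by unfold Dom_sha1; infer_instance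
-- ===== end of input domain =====

-- B replaces the bit-string SHA-1 pipeline with big-integer arithmetic (message packed into one
-- integer, closed-form padding, shift/mask chunk and word extraction, table-driven 20-round
-- segments, one 40-digit hex print); same digest on every admitted input.

abbrev pvSt := Nat × Nat × Nat × Nat × Nat

def pvMask : Nat := 0xFFFFFFFF

-- ===== PORT A =====
def pvLrot (n b : Nat) : Nat := ((n <<< b) ||| (n >>> (32 - b))) &&& pvMask

-- binary digits of n, most significant first (empty for 0)
def pvBinNat : Nat → List Char
  | 0 => []
  | (n+1) => pvBinNat ((n+1) / 2) ++ [if (n+1) % 2 = 1 then '1' else '0']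

-- format(m) with a zero-padded binary spec of width wd: zero-pad the binary form to width wd (exact for m ≥ 0)
def pvBinFmt (m wd : Nat) : List Char :=
  List.replicate (wd - (if m = 0 then ['0'] else pvBinNat m).length) '0' ++
    (if m = 0 then ['0'] else pvBinNat m)

-- int(s, 2): exact for the nonempty zero/one-character strings this program feeds it
def pvParseBin (s : List Char) : Nat :=
  s.foldl (fun a c => 2 * a + (if c = '1' then 1 else 0)) 0

-- hex digits, lowercase, most significant first (empty for 0)
def pvHexNat : Nat → List Char
  | 0 => []
  | (n+1) => pvHexNat ((n+1) / 16) ++ [Nat.digitChar ((n+1) % 16)]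

-- zero-padded lowercase hex of width w (exact for n ≥ 0): shared formatting primitive (width 8 in A, width 40 in B)
def pvHexFmt (n w : Nat) : List Char :=
  List.replicate (w - (if n = 0 then ['0'] else pvHexNat n).length) '0' ++
    (if n = 0 then ['0'] else pvHexNat n)

-- chunks(l, n) = [l[i:i+n] for i in range(0, len(l), n)]
def pvChunksA (l : List Char) (n : Nat) : List (List Char) :=
  (PySem.List.pyRange 0 l.length n).map (fun i => PySem.List.slice l (some i) (some (i + n)))

-- while len(pBits) % 512 != 448: pBits += "0"
def pvPadA (l : List Char) : List Char :=
  if l.length % 512 = 448 then l else pvPadA (l ++ ['0'])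
  termination_by (448 + 512 - l.length % 512) % 512
  decreasing_by simp; omega

-- w[n] = int(words[n], 2)  (words[n] is in range on every admitted input)
def pvFillA (words : List (List Char)) (w : List Nat) (n : Int) : List Nat :=
  w.set n.toNat (pvParseBin (words.getD n.toNat []))

-- w[i] = lrot(w[i-3] ^ w[i-8] ^ w[i-14] ^ w[i-16], 1)
def pvSchedA (w : List Nat) (i : Int) : List Nat :=
  w.set i.toNat (pvLrot ((w.getD (i.toNat - 3) 0) ^^^ (w.getD (i.toNat - 8) 0) ^^^
    (w.getD (i.toNat - 14) 0) ^^^ (w.getD (i.toNat - 16) 0)) 1)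

-- one round of the compression loop (if/elif chain exactly as in A)
def pvRoundA (w : List Nat) (s : pvSt) (i : Int) : pvSt :=
  let (a, b, c, d, e) := s
  let f := if 0 ≤ i ∧ i ≤ 19 then (b &&& c) ||| ((pvMask ^^^ b) &&& d)   -- (~b) & d, exact: b, d < 2^32 here
           else if 20 ≤ i ∧ i ≤ 39 then b ^^^ c ^^^ d
           else if 40 ≤ i ∧ i ≤ 59 then (b &&& c) ||| (b &&& d) ||| (c &&& d)
           else b ^^^ c ^^^ d
  let k := if 0 ≤ i ∧ i ≤ 19 then 0x5A827999
           else if 20 ≤ i ∧ i ≤ 39 then 0x6ED9EBA1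
           else if 40 ≤ i ∧ i ≤ 59 then 0x8F1BBCDC
           else 0xCA62C1D6
  ((pvLrot a 5 + f + e + k + w.getD i.toNat 0) &&& pvMask, a, pvLrot b 30, c, d)

-- the body of 'for ch in chunks(pBits, 512)'
def pvBlockA (h : pvSt) (ch : List Char) : pvSt :=
  let words := pvChunksA ch 32
  let w1 := (PySem.List.pyRange 0 16).foldl (pvFillA words) (List.replicate 80 0)
  let w := (PySem.List.pyRange 16 80).foldl pvSchedA w1
  let st := (PySem.List.pyRange 0 80).foldl (pvRoundA w) h
  ((h.1 + st.1) &&& pvMask, (h.2.1 + st.2.1) &&& pvMask, (h.2.2.1 + st.2.2.1) &&& pvMask,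
   (h.2.2.2.1 + st.2.2.2.1) &&& pvMask, (h.2.2.2.2 + st.2.2.2.2) &&& pvMask)

def sha1 (data : String) : String :=
  let bytes : List Char := (PySem.List.pyRange 0 data.toList.length).foldl
      (fun acc n => acc ++ pvBinFmt (PySem.List.pyGetD data.toList n ' ').toNat 8) []
  let bits := bytes ++ ['1']
  let pBits := pvPadA bits ++ pvBinFmt (bits.length - 1) 64
  let hs := (pvChunksA pBits 512).foldl pvBlockA
      (0x67452301, 0xEFCDAB89, 0x98BADCFE, 0x10325476, 0xC3D2E1F0)
  String.ofList (pvHexFmt hs.1 8 ++ pvHexFmt hs.2.1 8 ++ pvHexFmt hs.2.2.1 8 ++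
    pvHexFmt hs.2.2.2.1 8 ++ pvHexFmt hs.2.2.2.2 8)

-- ===== PORT B =====
-- the tuple of (f, k) pairs the segment loop iterates over (Source B's lambdas; ~x & z is exact
-- here since x, z < 2^32 at every call)
def pvSegs : List ((Nat → Nat → Nat → Nat) × Nat) :=
  [(fun x y z => (x &&& y) ||| ((pvMask ^^^ x) &&& z), 0x5A827999),
   (fun x y z => x ^^^ y ^^^ z, 0x6ED9EBA1),
   (fun x y z => (x &&& y) ||| (x &&& z) ||| (y &&& z), 0x8F1BBCDC),
   (fun x y z => x ^^^ y ^^^ z, 0xCA62C1D6)]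

-- a, b, c, d, e = (rol(a,5)+f(b,c,d)+e+k+w[t]) & M, a, rol(b,30), c, d ; t += 1
-- (w[t] is exact: 0 ≤ t < 80 = len(w) on every iteration; rol is Source B's rol = pvLrot)
def pvSegStep (w : List Nat) (fk : (Nat → Nat → Nat → Nat) × Nat) (p : pvSt × Nat) : pvSt × Nat :=
  let (a, b, c, d, e) := p.1
  (((pvLrot a 5 + fk.1 b c d + e + fk.2 + w.getD p.2 0) &&& pvMask, a, pvLrot b 30, c, d), p.2 + 1)

-- for _ in range(20): <pvSegStep>
def pvSeg (w : List Nat) (p : pvSt × Nat) (fk : (Nat → Nat → Nat → Nat) × Nat) : pvSt × Nat :=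
  (List.range 20).foldl (fun q _ => pvSegStep w fk q) p

-- w.append(rol(w[t-3] ^ w[t-8] ^ w[t-14] ^ w[t-16], 1))
def pvWSched (w : List Nat) (t : Int) : List Nat :=
  w ++ [pvLrot ((w.getD (t.toNat - 3) 0) ^^^ (w.getD (t.toNat - 8) 0) ^^^
    (w.getD (t.toNat - 14) 0) ^^^ (w.getD (t.toNat - 16) 0)) 1]

-- the body of 'for i in range(blocks-1, -1, -1)' (i ≥ 0 on every iteration; h has 5 elements)
def pvBodyB (padded : Nat) (h : List Nat) (i : Int) : List Nat :=
  let chunk := (padded >>> (512 * i.toNat)) &&& ((1 <<< 512) - 1)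
  let w0 := (PySem.List.pyRange 0 16).map (fun t => (chunk >>> (480 - 32 * t.toNat)) &&& pvMask)
  let w := (PySem.List.pyRange 16 80).foldl pvWSched w0
  let st := pvSegs.foldl (pvSeg w) ((h.getD 0 0, h.getD 1 0, h.getD 2 0, h.getD 3 0, h.getD 4 0), 0)
  List.zipWith (fun u v => (u + v) &&& pvMask) h
    [st.1.1, st.1.2.1, st.1.2.2.1, st.1.2.2.2.1, st.1.2.2.2.2]

def sha1_alt (data : String) : String :=
  let L := data.toList.length
  let n := data.toList.foldl (fun n c => (n <<< 8) ||| c.toNat) 0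
  let z := (PySem.Int.mod (447 - 8 * (L : Int)) 512).toNat
  let padded := (((n <<< 1) ||| 1) <<< (z + 64)) ||| ((8 * L) &&& ((1 <<< 64) - 1))
  let blocks := (8 * L + 1 + z + 64) / 512
  let h := (PySem.List.pyRange ((blocks : Int) - 1) (-1) (-1)).foldl (pvBodyB padded)
      [0x67452301, 0xEFCDAB89, 0x98BADCFE, 0x10325476, 0xC3D2E1F0]
  String.ofList (pvHexFmt ((h.getD 0 0 <<< 128) ||| (h.getD 1 0 <<< 96) ||| (h.getD 2 0 <<< 64) |||
    (h.getD 3 0 <<< 32) ||| h.getD 4 0) 40)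

-- ===== PRECONDITION & SPEC =====
-- Pre_ excludes only strings of at least 2^61 characters, where the message bit-length no longer
-- fits the 64-bit length field: there A raises IndexError (words[n] on a short final chunk) for
-- every length below ~2^541 and only returns a misassembled digest beyond that; no such input is
-- physically runnable, so no concrete excluded example can be exhibited.
def Pre_sha1 (data : String) : Prop := data.toList.length < 2 ^ 61
instance (data : String) : Decidable (Pre_sha1 data) := by unfold Pre_sha1; infer_instance
def pvWitness_sha1 : String := "abc"

def Spec_sha1 (data : String) (out : String) : Prop := out = sha1_alt data
instance (data : String) (out : String) : Decidable (Spec_sha1 data out) := by unfold Spec_sha1; infer_instance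

-- ===== CLAIM (what is proved, stated in full; the proofs are below) =====
def Claim_equal_sha1 : Prop := ∀ (data : String), Dom_sha1 data → Pre_sha1 data → Spec_sha1 data (sha1 data)

-- ===== LEMMAS AND PROOFS =====

-- bit strings of a byte list
def pvBits (bs : List Nat) : List Char := bs.flatMap (fun m => pvBinFmt m 8)

def pvIsBits (l : List Char) : Prop := ∀ c ∈ l, c = '0' ∨ c = '1'

def pvBounded (s : pvSt) : Prop :=
  s.1 < 2 ^ 32 ∧ s.2.1 < 2 ^ 32 ∧ s.2.2.1 < 2 ^ 32 ∧ s.2.2.2.1 < 2 ^ 32 ∧ s.2.2.2.2 < 2 ^ 32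

def pvToList (s : pvSt) : List Nat := [s.1, s.2.1, s.2.2.1, s.2.2.2.1, s.2.2.2.2]

-- ---- padding loop ----
theorem pvPadA_eq (l : List Char) :
    pvPadA l = l ++ List.replicate ((448 + 512 - l.length % 512) % 512) '0' := by
  induction l using pvPadA.induct with
  | case1 l h =>
    rw [pvPadA, if_pos h, h]
    simp
  | case2 l h ih =>
    rw [pvPadA, if_neg h, ih, List.append_assoc]
    congr 1
    have hlen : (l ++ ['0']).length = l.length + 1 := by simp
    rw [hlen, List.singleton_append, ← List.replicate_succ]
    congr 1
    omega

-- ---- int(·, 2) ----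
theorem pvParseBin_go (v : List Char) (a : Nat) :
    v.foldl (fun a c => 2 * a + (if c = '1' then 1 else 0)) a = a * 2 ^ v.length + pvParseBin v := by
  induction v generalizing a with
  | nil => simp [pvParseBin]
  | cons c v ih =>
    rw [List.foldl_cons, ih,
      show pvParseBin (c :: v) =
        (c :: v).foldl (fun a c => 2 * a + (if c = '1' then 1 else 0)) 0 from rfl,
      List.foldl_cons, ih, List.length_cons, pow_succ]
    ring

theorem pvParseBin_append (u v : List Char) :
    pvParseBin (u ++ v) = pvParseBin u * 2 ^ v.length + pvParseBin v := by
  show List.foldl _ 0 (u ++ v) = _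
  rw [List.foldl_append, pvParseBin_go]
  rfl

theorem pvParseBin_replicate_zero (k : Nat) : pvParseBin (List.replicate k '0') = 0 := by
  induction k with
  | zero => rfl
  | succ k ih => simpa [List.replicate_succ, pvParseBin] using ih

theorem pvParseBin_lt (v : List Char) (h : pvIsBits v) : pvParseBin v < 2 ^ v.length := by
  induction v with
  | nil => simp [pvParseBin]
  | cons c v ih =>
    have hv : pvIsBits v := fun x hx => h x (by simp [hx])
    have h1 : pvParseBin (c :: v) = pvParseBin [c] * 2 ^ v.length + pvParseBin v :=
      pvParseBin_append [c] v
    have h2 := ih hv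
    have h3 : pvParseBin [c] ≤ 1 := by
      show 2 * 0 + (if c = '1' then 1 else 0) ≤ 1
      split <;> omega
    have h4 : pvParseBin [c] * 2 ^ v.length ≤ 2 ^ v.length := by
      calc pvParseBin [c] * 2 ^ v.length ≤ 1 * 2 ^ v.length :=
            Nat.mul_le_mul_right _ h3
        _ = 2 ^ v.length := one_mul _
    rw [List.length_cons, pow_succ]
    omega

-- ---- '{0:0wb}' ----
theorem pvBinNat_parse (m : Nat) : pvParseBin (pvBinNat m) = m := by
  induction m using Nat.strong_induction_on with
  | _ m ih =>
    match m with
    | 0 => simp [pvBinNat, pvParseBin]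
    | n + 1 =>
      rw [pvBinNat, pvParseBin_append, ih ((n+1)/2) (by omega)]
      have : pvParseBin [if (n+1) % 2 = 1 then '1' else '0'] = (n+1) % 2 := by
        rcases Nat.mod_two_eq_zero_or_one (n+1) with h | h <;> simp [pvParseBin, h]
      simp only [List.length_cons, List.length_nil, this]
      omega

theorem pvBinNat_isBits (m : Nat) : pvIsBits (pvBinNat m) := by
  induction m using Nat.strong_induction_on with
  | _ m ih =>
    match m with
    | 0 => intro c hc; simp [pvBinNat] at hc
    | n + 1 =>
      intro c hc
      rw [pvBinNat] at hc
      rcases List.mem_append.mp hc with hc | hc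
      · exact ih ((n+1)/2) (by omega) c hc
      · simp at hc; split at hc <;> simp [hc]

theorem pvBinNat_length_le (m w : Nat) (h : m < 2 ^ w) : (pvBinNat m).length ≤ w := by
  induction m using Nat.strong_induction_on generalizing w with
  | _ m ih =>
    match m with
    | 0 => simp [pvBinNat]
    | n + 1 =>
      have hw : 1 ≤ w := by
        by_contra hw
        interval_cases w <;> omega
      rw [pvBinNat]
      have h2 : (n+1)/2 < 2 ^ (w - 1) := by
        have : 2 ^ w = 2 ^ (w - 1) * 2 := by
          rw [← pow_succ]; congr 1; omega
        omega
      have := ih ((n+1)/2) (by omega) (w - 1) h2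
      simp only [List.length_append, List.length_cons, List.length_nil]
      omega

theorem pvBinFmt_parse (m w : Nat) : pvParseBin (pvBinFmt m w) = m := by
  unfold pvBinFmt
  rw [pvParseBin_append, pvParseBin_replicate_zero, zero_mul, zero_add]
  split
  · next h => subst h; decide
  · next h => exact pvBinNat_parse m

theorem pvBinFmt_isBits (m w : Nat) : pvIsBits (pvBinFmt m w) := by
  intro c hc
  unfold pvBinFmt at hc
  rcases List.mem_append.mp hc with hc | hc
  · left; exact List.eq_of_mem_replicate hc
  · split at hc
    · simp at hc; simp [hc]
    · exact pvBinNat_isBits m c hc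

theorem pvBinFmt_length (m w : Nat) (h : m < 2 ^ w) (hw : 1 ≤ w) : (pvBinFmt m w).length = w := by
  unfold pvBinFmt
  have hs : (if m = 0 then ['0'] else pvBinNat m).length ≤ w := by
    split
    · simpa using hw
    · exact pvBinNat_length_le m w h
  simp only [List.length_append, List.length_replicate]
  omega

-- ---- pvBits ----
theorem pvBits_length (bs : List Nat) (h : ∀ b ∈ bs, b < 256) : (pvBits bs).length = 8 * bs.length := by
  induction bs with
  | nil => simp [pvBits]
  | cons b bs ih =>
    have hb : b < 2 ^ 8 := h b (by simp)
    have : pvBits (b :: bs) = pvBinFmt b 8 ++ pvBits bs := rfl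
    rw [this]
    simp only [List.length_append, pvBinFmt_length b 8 hb (by norm_num),
      ih (fun x hx => h x (by simp [hx])), List.length_cons]
    ring

theorem pvBits_isBits (bs : List Nat) : pvIsBits (pvBits bs) := by
  intro c hc
  rcases List.mem_flatMap.mp hc with ⟨b, _, hc⟩
  exact pvBinFmt_isBits b 8 c hc

theorem pvBits_parse_cons (b : Nat) (bs : List Nat) (_hb : b < 256) (h : ∀ x ∈ bs, x < 256) :
    pvParseBin (pvBits (b :: bs)) = b * 2 ^ (8 * bs.length) + pvParseBin (pvBits bs) := by
  rw [show pvBits (b :: bs) = pvBinFmt b 8 ++ pvBits bs from rfl, pvParseBin_append,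
    pvBinFmt_parse, pvBits_length bs h]

theorem pvVal_go (bs : List Nat) (a : Nat) :
    bs.foldl (fun a b => 256 * a + b) a =
      a * 256 ^ bs.length + bs.foldl (fun a b => 256 * a + b) 0 := by
  induction bs generalizing a with
  | nil => simp
  | cons b bs ih =>
    rw [List.foldl_cons, ih, List.foldl_cons, ih (256 * 0 + b), List.length_cons, pow_succ]
    ring

theorem pvBits_parse (bs : List Nat) (h : ∀ b ∈ bs, b < 256) :
    pvParseBin (pvBits bs) = bs.foldl (fun a b => 256 * a + b) 0 := by
  induction bs with
  | nil => simp [pvBits, pvParseBin]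
  | cons b bs ih =>
    rw [pvBits_parse_cons b bs (h b (by simp)) (fun x hx => h x (by simp [hx])),
      ih (fun x hx => h x (by simp [hx])), List.foldl_cons, pvVal_go bs (256 * 0 + b), pow_mul]
    norm_num

-- ---- shifts and masks of a parsed bit string ----
theorem pvOrDisj (x y k : Nat) (hx : 2 ^ k ∣ x) (hy : y < 2 ^ k) : x ||| y = x + y := by
  obtain ⟨a, rfl⟩ := hx
  rw [← Nat.two_pow_add_eq_or_of_lt hy]

theorem pvParse_shiftRight (l : List Char) (hl : pvIsBits l) (k : Nat) (hk : k ≤ l.length) :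
    pvParseBin l >>> k = pvParseBin (l.take (l.length - k)) := by
  have hdlen : (l.drop (l.length - k)).length = k := by
    rw [List.length_drop]; omega
  have hdl : pvParseBin (l.drop (l.length - k)) < 2 ^ k := by
    have := pvParseBin_lt (l.drop (l.length - k)) (fun c hc => hl c (List.mem_of_mem_drop hc))
    rwa [hdlen] at this
  conv_lhs => rw [show l = l.take (l.length - k) ++ l.drop (l.length - k) from
    (List.take_append_drop _ _).symm]
  rw [pvParseBin_append, hdlen, Nat.shiftRight_eq_div_pow, Nat.mul_comm,
    Nat.mul_add_div (Nat.two_pow_pos k), Nat.div_eq_of_lt hdl, Nat.add_zero]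

theorem pvParse_mod (l : List Char) (hl : pvIsBits l) (k : Nat) (hk : k ≤ l.length) :
    pvParseBin l % 2 ^ k = pvParseBin (l.drop (l.length - k)) := by
  have hdlen : (l.drop (l.length - k)).length = k := by
    rw [List.length_drop]; omega
  have hdl : pvParseBin (l.drop (l.length - k)) < 2 ^ k := by
    have := pvParseBin_lt (l.drop (l.length - k)) (fun c hc => hl c (List.mem_of_mem_drop hc))
    rwa [hdlen] at this
  conv_lhs => rw [show l = l.take (l.length - k) ++ l.drop (l.length - k) from
    (List.take_append_drop _ _).symm]
  rw [pvParseBin_append, hdlen, Nat.mul_add_mod_self_right, Nat.mod_eq_of_lt hdl]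

-- ---- chunks(l, n) as take/drop groups ----
theorem pvChunksA_eq (l : List Char) (n c : Nat) (hn : 0 < n) (hl : l.length = c * n) :
    pvChunksA l n = (List.range c).map (fun k => (l.drop (n * k)).take n) := by
  unfold pvChunksA
  rw [PySem.List.pyRange_of_pos 0 (l.length : Int) (s := (n : Int)) (by exact_mod_cast hn)]
  have hc : (if (0:Int) < (l.length : Int) then
      (((l.length : Int) - 0 + n - 1) / n).toNat else 0) = c := by
    rw [hl]
    rcases Nat.eq_zero_or_pos c with rfl | hcpos
    · simp
    · rw [if_pos (by exact_mod_cast Nat.mul_pos hcpos hn)]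
      rw [show ((((c * n : Nat) : Int)) - 0 + n - 1) = (n - 1) + (c : Int) * n from by push_cast; ring]
      rw [Int.add_mul_ediv_right _ _ (by exact_mod_cast hn.ne')]
      rw [Int.ediv_eq_zero_of_lt (by omega) (by omega)]
      simp
  rw [hc, List.map_map]
  apply List.map_congr_left
  intro k hk
  simp only [Function.comp_apply]
  rw [show (0 : Int) + (n : Int) * (k : Int) = ((n * k : Nat) : Int) from by push_cast; ring,
    show ((( (n * k : Nat)) : Int) + (n : Int)) = ((n * k + n : Nat) : Int) from by push_cast; ring,
    PySem.List.slice_natCast]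
  congr 1
  omega

-- ---- w[n] assignments over replicate 80 ----
theorem pvFillA_aux (words : List (List Char)) (hw : words.length = 16)
    (m : Nat) (hm : m ≤ 16) :
    (PySem.List.pyRange 0 (m : Int)).foldl (pvFillA words) (List.replicate 80 0) =
      (words.map pvParseBin).take m ++ List.replicate (80 - m) 0 := by
  induction m with
  | zero =>
    rw [show ((0 : Nat) : Int) = 0 from rfl, PySem.List.pyRange_one_eq_nil (by norm_num)]
    simp
  | succ m ih =>
    rw [show ((m + 1 : Nat) : Int) = (m : Int) + 1 from by push_cast; ring,
      PySem.List.pyRange_one_succ_right (by exact_mod_cast Nat.zero_le m),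
      List.foldl_append, ih (by omega)]
    simp only [List.foldl_cons, List.foldl_nil]
    unfold pvFillA
    have hmt : ((m : Int)).toNat = m := Int.toNat_natCast m
    have hmw : m < words.length := by omega
    have hlen : ((words.map pvParseBin).take m).length = m := by
      rw [List.length_take, List.length_map, hw]
      omega
    rw [hmt, List.set_append, if_neg (by rw [hlen]; omega), hlen, Nat.sub_self,
      show (80 - m : Nat) = (80 - (m + 1)) + 1 from by omega, List.replicate_succ,
      List.set_cons_zero, List.take_add_one]
    have hx : words.getD m [] = words[m] := List.getD_eq_getElem words [] hmw
    have hy : (words.map pvParseBin)[m]? = some (pvParseBin words[m]) := by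
      rw [List.getElem?_map, List.getElem?_eq_getElem hmw]
      rfl
    rw [hx, hy]
    simp

theorem pvFillA_eq (words : List (List Char)) (hw : words.length = 16) :
    (PySem.List.pyRange 0 16).foldl (pvFillA words) (List.replicate 80 0) =
      words.map pvParseBin ++ List.replicate 64 0 := by
  have h := pvFillA_aux words hw 16 (by norm_num)
  rw [show ((16 : Nat) : Int) = (16 : Int) from by norm_num] at h
  rw [h, List.take_of_length_le (by rw [List.length_map, hw])]

-- ---- schedule: set-into-80 vs append ----
theorem pvSched_pair (m : Nat) (h16 : 16 ≤ m) (h80 : m ≤ 80) (v : List Nat) (hv : v.length = 16) :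
    ((PySem.List.pyRange 16 (m : Int)).foldl pvWSched v).length = m ∧
    (PySem.List.pyRange 16 (m : Int)).foldl pvSchedA (v ++ List.replicate 64 0) =
      (PySem.List.pyRange 16 (m : Int)).foldl pvWSched v ++ List.replicate (80 - m) 0 := by
  revert h80
  induction m, h16 using Nat.le_induction with
  | base =>
    intro h80
    rw [show ((16 : Nat) : Int) = (16 : Int) from by norm_num,
      PySem.List.pyRange_one_eq_nil (by norm_num)]
    simp [hv]
  | succ m hm ih =>
    intro h80
    obtain ⟨ihlen, iheq⟩ := ih (by omega)
    rw [show ((m + 1 : Nat) : Int) = (m : Int) + 1 from by push_cast; ring,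
      PySem.List.pyRange_one_succ_right (by exact_mod_cast hm), List.foldl_append,
      List.foldl_append, iheq]
    simp only [List.foldl_cons, List.foldl_nil]
    set wB := (PySem.List.pyRange 16 (m : Int)).foldl pvWSched v with hwB
    have hmt : ((m : Int)).toNat = m := Int.toNat_natCast m
    have hget : ∀ j : Nat, j < m →
        (wB ++ List.replicate (80 - m) 0).getD j 0 = wB.getD j 0 := by
      intro j hj
      exact List.getD_append _ _ _ _ (by rw [ihlen]; omega)
    have hx : pvSchedA (wB ++ List.replicate (80 - m) 0) (m : Int) =
        pvWSched wB (m : Int) ++ List.replicate (80 - (m + 1)) 0 := by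
      unfold pvSchedA pvWSched
      rw [hmt, hget (m - 3) (by omega), hget (m - 8) (by omega),
        hget (m - 14) (by omega), hget (m - 16) (by omega)]
      rw [List.set_append, if_neg (by rw [ihlen]; omega), ihlen, Nat.sub_self,
        show (80 - m : Nat) = (80 - (m + 1)) + 1 from by omega, List.replicate_succ,
        List.set_cons_zero, List.append_assoc]
      rfl
    refine ⟨?_, hx⟩
    unfold pvWSched
    simp [ihlen]

-- ---- four 20-round segments = the 80-round if-chain loop ----
theorem pvSegGen (w : List Nat) (fk : (Nat → Nat → Nat → Nat) × Nat) (m t0 : Nat)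
    (h : ∀ (t : Nat) (s : pvSt), t0 ≤ t → t < t0 + m →
      pvSegStep w fk (s, t) = (pvRoundA w s (t : Int), t + 1)) (s : pvSt) :
    (List.range m).foldl (fun q _ => pvSegStep w fk q) (s, t0) =
      ((PySem.List.pyRange (t0 : Int) ((t0 : Int) + (m : Int))).foldl (pvRoundA w) s, t0 + m) := by
  induction m with
  | zero =>
    rw [show ((0 : Nat) : Int) = 0 from rfl, Int.add_zero,
      PySem.List.pyRange_one_eq_nil (le_refl _)]
    simp
  | succ m ih =>
    rw [List.range_succ, List.foldl_append,
      ih (fun t s' ht1 ht2 => h t s' ht1 (by omega))]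
    simp only [List.foldl_cons, List.foldl_nil]
    rw [h (t0 + m) _ (by omega) (by omega),
      show ((t0 : Int) + ((m + 1 : Nat) : Int)) = ((t0 + m : Nat) : Int) + 1 from by
        push_cast; ring,
      PySem.List.pyRange_one_succ_right (by exact_mod_cast Nat.le_add_right t0 m),
      List.foldl_append,
      show ((t0 : Int) + (m : Nat)) = ((t0 + m : Nat) : Int) from by push_cast; ring]
    simp only [List.foldl_cons, List.foldl_nil]
    rw [Nat.add_assoc]

theorem pvSegs_fold (w : List Nat) (s : pvSt) :
    pvSegs.foldl (pvSeg w) (s, 0) = ((PySem.List.pyRange 0 80).foldl (pvRoundA w) s, 80) := by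
  have h1 : ∀ (t : Nat) (s' : pvSt), 0 ≤ t → t < 0 + 20 →
      pvSegStep w (fun x y z => (x &&& y) ||| ((pvMask ^^^ x) &&& z), 0x5A827999) (s', t) =
        (pvRoundA w s' (t : Int), t + 1) := by
    intro t s' _ ht2
    obtain ⟨a, b, c, d, e⟩ := s'
    have c1 : (0 : Int) ≤ (t : Int) ∧ (t : Int) ≤ 19 := by omega
    simp only [pvSegStep, pvRoundA, if_pos c1, Int.toNat_natCast]
  have h2 : ∀ (t : Nat) (s' : pvSt), 20 ≤ t → t < 20 + 20 →
      pvSegStep w (fun x y z => x ^^^ y ^^^ z, 0x6ED9EBA1) (s', t) =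
        (pvRoundA w s' (t : Int), t + 1) := by
    intro t s' ht1 ht2
    obtain ⟨a, b, c, d, e⟩ := s'
    have c1 : ¬((0 : Int) ≤ (t : Int) ∧ (t : Int) ≤ 19) := by omega
    have c2 : (20 : Int) ≤ (t : Int) ∧ (t : Int) ≤ 39 := by omega
    simp only [pvSegStep, pvRoundA, if_neg c1, if_pos c2, Int.toNat_natCast]
  have h3 : ∀ (t : Nat) (s' : pvSt), 40 ≤ t → t < 40 + 20 →
      pvSegStep w (fun x y z => (x &&& y) ||| (x &&& z) ||| (y &&& z), 0x8F1BBCDC) (s', t) =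
        (pvRoundA w s' (t : Int), t + 1) := by
    intro t s' ht1 ht2
    obtain ⟨a, b, c, d, e⟩ := s'
    have c1 : ¬((0 : Int) ≤ (t : Int) ∧ (t : Int) ≤ 19) := by omega
    have c2 : ¬((20 : Int) ≤ (t : Int) ∧ (t : Int) ≤ 39) := by omega
    have c3 : (40 : Int) ≤ (t : Int) ∧ (t : Int) ≤ 59 := by omega
    simp only [pvSegStep, pvRoundA, if_neg c1, if_neg c2, if_pos c3, Int.toNat_natCast]
  have h4 : ∀ (t : Nat) (s' : pvSt), 60 ≤ t → t < 60 + 20 →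
      pvSegStep w (fun x y z => x ^^^ y ^^^ z, 0xCA62C1D6) (s', t) =
        (pvRoundA w s' (t : Int), t + 1) := by
    intro t s' ht1 ht2
    obtain ⟨a, b, c, d, e⟩ := s'
    have c1 : ¬((0 : Int) ≤ (t : Int) ∧ (t : Int) ≤ 19) := by omega
    have c2 : ¬((20 : Int) ≤ (t : Int) ∧ (t : Int) ≤ 39) := by omega
    have c3 : ¬((40 : Int) ≤ (t : Int) ∧ (t : Int) ≤ 59) := by omega
    simp only [pvSegStep, pvRoundA, if_neg c1, if_neg c2, if_neg c3, Int.toNat_natCast]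
  simp only [pvSegs, List.foldl_cons, List.foldl_nil, pvSeg]
  rw [pvSegGen w _ 20 0 h1, pvSegGen w _ 20 20 h2, pvSegGen w _ 20 40 h3, pvSegGen w _ 20 60 h4]
  norm_num
  rw [show PySem.List.pyRange 0 80 = PySem.List.pyRange 0 20 ++ PySem.List.pyRange 20 40 ++
      PySem.List.pyRange 40 60 ++ PySem.List.pyRange 60 80 from by
    rw [PySem.List.pyRange_one_append 0 60 80 (by norm_num) (by norm_num),
      PySem.List.pyRange_one_append 0 40 60 (by norm_num) (by norm_num),
      PySem.List.pyRange_one_append 0 20 40 (by norm_num) (by norm_num)]]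
  rw [List.foldl_append, List.foldl_append, List.foldl_append]

-- ---- one block: B's body = A's body ----
theorem pvBody_eq (P : Nat) (pB : List Char) (blocks : Nat) (hbits : pvIsBits pB)
    (hlen : pB.length = 512 * blocks) (hP : P = pvParseBin pB) (i j : Nat)
    (hij : i + j + 1 = blocks) (st : pvSt) :
    pvBodyB P (pvToList st) (i : Int) = pvToList (pvBlockA st ((pB.drop (512 * j)).take 512)) := by
  have hj : j < blocks := by omega
  set ch := (pB.drop (512 * j)).take 512 with hch
  have hchlen : ch.length = 512 := by
    rw [hch, List.length_take, List.length_drop, hlen]; omega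
  have hchbits : pvIsBits ch := fun c hc =>
    hbits c (List.mem_of_mem_drop (List.mem_of_mem_take hc))
  have hchunk : (P >>> (512 * i)) &&& ((1 <<< 512) - 1) = pvParseBin ch := by
    have h1 : 512 * i ≤ pB.length := by rw [hlen]; omega
    have htl : (pB.take (pB.length - 512 * i)).length = 512 * (j + 1) := by
      rw [List.length_take]; omega
    rw [hP, pvParse_shiftRight pB hbits (512 * i) h1,
      show (1 <<< 512) - 1 = 2 ^ 512 - 1 from by rw [Nat.shiftLeft_eq, Nat.one_mul],
      Nat.and_two_pow_sub_one_eq_mod,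
      pvParse_mod _ (fun c hc => hbits c (List.mem_of_mem_take hc)) 512 (by rw [htl]; omega),
      htl, show 512 * (j + 1) - 512 = 512 * j from by omega, List.drop_take,
      show pB.length - 512 * i - 512 * j = 512 from by rw [hlen]; omega, hch]
  have hch32 : pvChunksA ch 32 = (List.range 16).map (fun k => (ch.drop (32 * k)).take 32) :=
    pvChunksA_eq ch 32 16 (by norm_num) (by rw [hchlen])
  have hword : ∀ k : Nat, k < 16 →
      ((pvParseBin ch >>> (480 - 32 * k)) &&& pvMask) = pvParseBin ((ch.drop (32 * k)).take 32) := by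
    intro k hk
    have h1 : 480 - 32 * k ≤ ch.length := by rw [hchlen]; omega
    have htl : (ch.take (ch.length - (480 - 32 * k))).length = 32 * k + 32 := by
      rw [List.length_take]; omega
    rw [pvParse_shiftRight ch hchbits _ h1,
      show pvMask = 2 ^ 32 - 1 from by norm_num [pvMask],
      Nat.and_two_pow_sub_one_eq_mod,
      pvParse_mod _ (fun c hc => hchbits c (List.mem_of_mem_take hc)) 32 (by rw [htl]; omega),
      htl, show 32 * k + 32 - 32 = 32 * k from by omega, List.drop_take,
      show ch.length - (480 - 32 * k) - 32 * k = 32 from by rw [hchlen]; omega]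
  have hw0 : (PySem.List.pyRange 0 16).map
      (fun t => ((pvParseBin ch) >>> (480 - 32 * t.toNat)) &&& pvMask) =
      (pvChunksA ch 32).map pvParseBin := by
    rw [hch32, List.map_map, PySem.List.pyRange_one 0 16, List.map_map]
    apply List.map_congr_left
    intro k hk
    have hk16 : k < 16 := by
      have := List.mem_range.mp hk
      omega
    simp only [Function.comp_apply]
    rw [show (((0 : Int) + (k : Int))).toNat = k from by omega]
    exact hword k hk16
  have hwlen : (pvChunksA ch 32).length = 16 := by rw [hch32]; simp
  obtain ⟨hlen80, heq⟩ := pvSched_pair 80 (by norm_num) (by norm_num)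
    ((pvChunksA ch 32).map pvParseBin) (by rw [List.length_map, hwlen])
  rw [show ((80 : Nat) : Int) = (80 : Int) from by norm_num] at heq
  obtain ⟨a, b, c, d, e⟩ := st
  simp only [pvBodyB, pvBlockA, pvToList, Int.toNat_natCast]
  rw [hchunk, hw0, pvFillA_eq _ hwlen, heq]
  simp only [Nat.sub_self, List.replicate_zero, List.append_nil]
  rw [show (List.getD [a, b, c, d, e] 0 0, List.getD [a, b, c, d, e] 1 0,
      List.getD [a, b, c, d, e] 2 0, List.getD [a, b, c, d, e] 3 0,
      List.getD [a, b, c, d, e] 4 0) = (a, b, c, d, e) from rfl]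
  rw [pvSegs_fold]
  simp [List.zipWith]

-- ---- the block loop: countdown over i = descending chunk suffix ----
theorem pvBlocks_corr (P : Nat) (pB : List Char) (blocks : Nat) (hbits : pvIsBits pB)
    (hlen : pB.length = 512 * blocks) (hP : P = pvParseBin pB) :
    ∀ (c : Nat), c ≤ blocks → ∀ (st : pvSt),
      (PySem.List.pyRange ((c : Int) - 1) (-1) (-1)).foldl (pvBodyB P) (pvToList st) =
        pvToList (((List.range c).map (fun k => (pB.drop (512 * (blocks - c + k))).take 512)).foldl
          pvBlockA st) := by
  intro c
  induction c with
  | zero =>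
    intro _ st
    rw [show ((0 : Nat) : Int) - 1 = -1 from by norm_num,
      PySem.List.pyRange_neg_one_eq_nil (le_refl _)]
    simp
  | succ c ih =>
    intro hc st
    rw [show ((c + 1 : Nat) : Int) - 1 = (c : Int) from by push_cast; ring,
      PySem.List.pyRange_neg_one_cons (by omega : (-1 : Int) < (c : Int)), List.foldl_cons,
      pvBody_eq P pB blocks hbits hlen hP c (blocks - (c + 1)) (by omega) st,
      ih (by omega)]
    rw [List.range_succ_eq_map, List.map_cons, List.foldl_cons, Nat.add_zero, List.map_map]
    have hmaps : (List.range c).map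
        (fun k => (pB.drop (512 * (blocks - c + k))).take 512) =
        (List.range c).map
          ((fun k => (pB.drop (512 * (blocks - (c + 1) + k))).take 512) ∘ Nat.succ) := by
      apply List.map_congr_left
      intro k hk
      simp only [Function.comp_apply, Nat.succ_eq_add_one]
      rw [show blocks - (c + 1) + (k + 1) = blocks - c + k from by omega]
    rw [hmaps]
    simp

-- ---- boundedness of the digest registers ----
theorem pvMask_lt (x : Nat) : x &&& pvMask < 2 ^ 32 := by
  have h1 : x &&& pvMask ≤ pvMask := Nat.and_le_right
  have h2 : pvMask = 2 ^ 32 - 1 := by norm_num [pvMask]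
  omega

theorem pvFold_bounded (chs : List (List Char)) (st : pvSt) (h : pvBounded st) :
    pvBounded (chs.foldl pvBlockA st) := by
  induction chs generalizing st with
  | nil => exact h
  | cons ch chs ih =>
    refine ih _ ?_
    exact ⟨pvMask_lt _, pvMask_lt _, pvMask_lt _, pvMask_lt _, pvMask_lt _⟩

-- ---- hex formatting: one width-40 render = five width-8 renders ----
theorem pvHexNat_pos (m : Nat) (h : 0 < m) :
    pvHexNat m = pvHexNat (m / 16) ++ [Nat.digitChar (m % 16)] := by
  match m, h with
  | (n+1), _ => rw [pvHexNat]

theorem pvHexNat_length_le (m w : Nat) (h : m < 16 ^ w) : (pvHexNat m).length ≤ w := by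
  induction m using Nat.strong_induction_on generalizing w with
  | _ m ih =>
    match m with
    | 0 => simp [pvHexNat]
    | n + 1 =>
      have hw : 1 ≤ w := by
        by_contra hw
        interval_cases w <;> omega
      rw [pvHexNat]
      have h2 : (n+1)/16 < 16 ^ (w - 1) := by
        have : 16 ^ w = 16 ^ (w - 1) * 16 := by
          rw [← pow_succ]; congr 1; omega
        omega
      have := ih ((n+1)/16) (by omega) (w - 1) h2
      simp only [List.length_append, List.length_cons, List.length_nil]
      omega

def pvHexPad (w b : Nat) : List Char := List.replicate (w - (pvHexNat b).length) '0' ++ pvHexNat b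

theorem pvHexFmt_eq_pad (b w : Nat) (hw : 1 ≤ w) : pvHexFmt b w = pvHexPad w b := by
  unfold pvHexFmt pvHexPad
  rcases Nat.eq_zero_or_pos b with rfl | hb
  · simp only [pvHexNat, reduceIte, List.length_cons, List.length_nil, List.append_nil,
      Nat.sub_zero]
    conv_rhs => rw [show w = (w - 1) + 1 from by omega, List.replicate_succ']
  · rw [if_neg (by omega)]

theorem pvHexPad_succ (w b : Nat) (h : b < 16 ^ (w + 1)) :
    pvHexPad (w + 1) b = pvHexPad w (b / 16) ++ [Nat.digitChar (b % 16)] := by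
  unfold pvHexPad
  rcases Nat.eq_zero_or_pos b with rfl | hb
  · simp only [pvHexNat, Nat.zero_div, Nat.zero_mod, List.length_nil, Nat.sub_zero,
      List.append_nil]
    rw [List.replicate_succ']
    rfl
  · rw [pvHexNat_pos b hb]
    have hl : (pvHexNat (b / 16)).length ≤ w := by
      apply pvHexNat_length_le
      have : 16 ^ (w + 1) = 16 ^ w * 16 := pow_succ 16 w
      omega
    simp only [List.length_append, List.length_cons, List.length_nil, List.append_assoc]
    congr 2
    omega

theorem pvHexNat_mul_add (w : Nat) : ∀ (a b : Nat), 0 < a → b < 16 ^ w →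
    pvHexNat (a * 16 ^ w + b) = pvHexNat a ++ pvHexPad w b := by
  induction w with
  | zero =>
    intro a b ha hb
    interval_cases b
    simp only [pvHexPad, pvHexNat, Nat.pow_zero, Nat.mul_one, Nat.add_zero, List.length_nil,
      Nat.sub_zero, List.replicate_zero, List.append_nil]
  | succ w ih =>
    intro a b ha hb
    have hm : 0 < a * 16 ^ (w + 1) + b := by positivity
    rw [pvHexNat_pos _ hm]
    have hdiv : (a * 16 ^ (w + 1) + b) / 16 = a * 16 ^ w + b / 16 := by
      rw [pow_succ]
      rw [show a * (16 ^ w * 16) + b = 16 * (a * 16 ^ w) + b from by ring]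
      rw [Nat.mul_add_div (by norm_num)]
    have hmod : (a * 16 ^ (w + 1) + b) % 16 = b % 16 := by
      rw [pow_succ, show a * (16 ^ w * 16) + b = a * 16 ^ w * 16 + b from by ring,
        Nat.mul_add_mod_self_right]
    have hb16 : b / 16 < 16 ^ w := by
      have : 16 ^ (w + 1) = 16 ^ w * 16 := pow_succ 16 w
      omega
    rw [hdiv, hmod, ih a (b / 16) ha hb16, List.append_assoc, ← pvHexPad_succ w b hb]

theorem pvHexFmt_split (a b v w : Nat) (ha : a < 16 ^ v) (hb : b < 16 ^ w)
    (hv : 1 ≤ v) (hw : 1 ≤ w) :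
    pvHexFmt (a * 16 ^ w + b) (v + w) = pvHexFmt a v ++ pvHexFmt b w := by
  rw [pvHexFmt_eq_pad _ _ (by omega), pvHexFmt_eq_pad _ _ hv, pvHexFmt_eq_pad _ _ hw]
  have hlb : (pvHexNat b).length ≤ w := pvHexNat_length_le b w hb
  rcases Nat.eq_zero_or_pos a with rfl | ha0
  · simp only [Nat.zero_mul, Nat.zero_add]
    unfold pvHexPad
    rw [show pvHexNat 0 = [] from by simp [pvHexNat], List.append_nil, List.length_nil, Nat.sub_zero,
      show v + w - (pvHexNat b).length = v + (w - (pvHexNat b).length) from by omega,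
      List.replicate_add, List.append_assoc]
  · unfold pvHexPad
    rw [pvHexNat_mul_add w a b ha0 hb]
    have hla : (pvHexNat a).length ≤ v := pvHexNat_length_le a v ha
    have hpadlen : (pvHexPad w b).length = w := by
      unfold pvHexPad
      simp only [List.length_append, List.length_replicate]
      omega
    simp only [List.length_append, hpadlen]
    rw [show v + w - ((pvHexNat a).length + w) = v - (pvHexNat a).length from by omega,
      List.append_assoc]
    unfold pvHexPad
    simp

theorem pvMulLt (x j k : Nat) (hx : x < 16 ^ 8) (hk : 32 + j = k) : x * 2 ^ j < 2 ^ k := by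
  subst hk
  rw [pow_add, show (2 : Nat) ^ 32 = 16 ^ 8 from by norm_num]
  exact Nat.mul_lt_mul_of_lt_of_le hx (le_refl _) (by positivity)

theorem pvHex40 (x0 x1 x2 x3 x4 : Nat) (h0 : x0 < 2 ^ 32) (h1 : x1 < 2 ^ 32) (h2 : x2 < 2 ^ 32)
    (h3 : x3 < 2 ^ 32) (h4 : x4 < 2 ^ 32) :
    pvHexFmt ((x0 <<< 128) ||| (x1 <<< 96) ||| (x2 <<< 64) ||| (x3 <<< 32) ||| x4) 40 =
      pvHexFmt x0 8 ++ pvHexFmt x1 8 ++ pvHexFmt x2 8 ++ pvHexFmt x3 8 ++ pvHexFmt x4 8 := by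
  have hC : (2 : Nat) ^ 32 = 16 ^ 8 := by norm_num
  rw [hC] at h0 h1 h2 h3 h4
  have e : (x0 <<< 128) ||| (x1 <<< 96) ||| (x2 <<< 64) ||| (x3 <<< 32) ||| x4 =
      (((x0 * 16 ^ 8 + x1) * 16 ^ 8 + x2) * 16 ^ 8 + x3) * 16 ^ 8 + x4 := by
    rw [Nat.shiftLeft_eq, Nat.shiftLeft_eq, Nat.shiftLeft_eq, Nat.shiftLeft_eq]
    rw [pvOrDisj (x0 * 2 ^ 128) (x1 * 2 ^ 96) 128 ⟨x0, by ring⟩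
        (pvMulLt x1 96 128 h1 (by norm_num))]
    rw [pvOrDisj (x0 * 2 ^ 128 + x1 * 2 ^ 96) (x2 * 2 ^ 64) 96
        (dvd_add ⟨x0 * 2 ^ 32, by ring⟩ ⟨x1, by ring⟩)
        (pvMulLt x2 64 96 h2 (by norm_num))]
    rw [pvOrDisj (x0 * 2 ^ 128 + x1 * 2 ^ 96 + x2 * 2 ^ 64) (x3 * 2 ^ 32) 64
        (dvd_add (dvd_add ⟨x0 * 2 ^ 64, by ring⟩ ⟨x1 * 2 ^ 32, by ring⟩) ⟨x2, by ring⟩)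
        (pvMulLt x3 32 64 h3 (by norm_num))]
    rw [pvOrDisj (x0 * 2 ^ 128 + x1 * 2 ^ 96 + x2 * 2 ^ 64 + x3 * 2 ^ 32) x4 32
        (dvd_add (dvd_add (dvd_add ⟨x0 * 2 ^ 96, by ring⟩ ⟨x1 * 2 ^ 64, by ring⟩)
          ⟨x2 * 2 ^ 32, by ring⟩) ⟨x3, by ring⟩) (by rw [← hC] at h4; exact h4)]
    have h28 : (2 : Nat) ^ 128 = 16 ^ 8 * 16 ^ 8 * 16 ^ 8 * 16 ^ 8 := by norm_num
    have h96 : (2 : Nat) ^ 96 = 16 ^ 8 * 16 ^ 8 * 16 ^ 8 := by norm_num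
    have h64 : (2 : Nat) ^ 64 = 16 ^ 8 * 16 ^ 8 := by norm_num
    rw [h28, h96, h64, hC.symm, hC]
    ring
  have hcc : (16 : Nat) ^ 8 = 4294967296 := by norm_num
  have b1 : x0 * 16 ^ 8 + x1 < 16 ^ 16 := by
    rw [hcc] at *
    have : (16 : Nat) ^ 16 = 18446744073709551616 := by norm_num
    omega
  have b2 : (x0 * 16 ^ 8 + x1) * 16 ^ 8 + x2 < 16 ^ 24 := by
    rw [hcc] at *
    have e16 : (16 : Nat) ^ 16 = 18446744073709551616 := by norm_num
    have e24 : (16 : Nat) ^ 24 = 79228162514264337593543950336 := by norm_num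
    rw [e16] at b1
    rw [e24]
    nlinarith
  have b3 : ((x0 * 16 ^ 8 + x1) * 16 ^ 8 + x2) * 16 ^ 8 + x3 < 16 ^ 32 := by
    rw [hcc] at *
    have e24 : (16 : Nat) ^ 24 = 79228162514264337593543950336 := by norm_num
    have e32 : (16 : Nat) ^ 32 = 340282366920938463463374607431768211456 := by norm_num
    rw [e24] at b2
    rw [e32]
    nlinarith
  rw [e,
    show (40 : Nat) = 32 + 8 from by norm_num,
    pvHexFmt_split _ x4 32 8 b3 h4 (by norm_num) (by norm_num),
    show (32 : Nat) = 24 + 8 from by norm_num,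
    pvHexFmt_split _ x3 24 8 b2 h3 (by norm_num) (by norm_num),
    show (24 : Nat) = 16 + 8 from by norm_num,
    pvHexFmt_split _ x2 16 8 b1 h2 (by norm_num) (by norm_num),
    show (16 : Nat) = 8 + 8 from by norm_num,
    pvHexFmt_split x0 x1 8 8 h0 h1 (by norm_num) (by norm_num)]

-- ===== VERDICT (by name: the statement is the Claim_ definition above) =====
theorem sha1_spec : Claim_equal_sha1 := by
  intro data hdom hpre
  unfold Spec_sha1
  simp only [sha1, sha1_alt]
  set msg := data.toList.map (fun c => c.toNat) with hmsg
  have hmb : ∀ b ∈ msg, b < 256 := by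
    intro b hbm
    rw [hmsg] at hbm
    simp only [List.mem_map] at hbm
    obtain ⟨ch, hch, rfl⟩ := hbm
    unfold Dom_sha1 pvDomStr at hdom
    rw [List.all_eq_true] at hdom
    have h2 := hdom ch hch
    unfold pvDomChar at h2
    simp at h2
    omega
  set L := msg.length with hL
  have hLdata : data.toList.length = L := by rw [hL, hmsg]; simp
  have h64 : 8 * L < 2 ^ 64 := by
    unfold Pre_sha1 at hpre
    rw [hLdata] at hpre
    omega
  -- A's byte loop builds pvBits msg
  have hbytes : (PySem.List.pyRange 0 (data.toList.length : Int)).foldl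
      (fun acc n => acc ++ pvBinFmt (PySem.List.pyGetD data.toList n ' ').toNat 8) [] =
      pvBits msg := by
    rw [PySem.List.foldl_pyRange_zero_pyGetD' data.toList ' '
        (fun acc c => acc ++ pvBinFmt c.toNat 8) [],
      PySem.List.foldl_append_eq_flatMap (fun c => pvBinFmt c.toNat 8) data.toList [],
      hmsg]
    unfold pvBits
    rw [List.flatMap_map]
    simp
  rw [hbytes, hLdata]
  have hbl : (pvBits msg ++ ['1']).length = 8 * L + 1 := by
    rw [List.length_append, pvBits_length msg hmb, hL]
    simp
  rw [show (pvBits msg ++ ['1']).length - 1 = 8 * L from by rw [hbl]; omega]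
  -- B's closed-form zero count equals A's padding loop count
  set z := (PySem.Int.mod (447 - 8 * (L : Int)) 512).toNat with hzdef
  have hzint : (z : Int) = (447 - 8 * (L : Int)) % 512 := by
    rw [hzdef, PySem.Int.mod_eq_emod_of_pos (by norm_num),
      Int.toNat_of_nonneg (Int.emod_nonneg _ (by norm_num))]
  have hpad : (448 + 512 - (8 * L + 1) % 512) % 512 = z := by omega
  have hpB : pvPadA (pvBits msg ++ ['1']) ++ pvBinFmt (8 * L) 64 =
      pvBits msg ++ ['1'] ++ List.replicate z '0' ++ pvBinFmt (8 * L) 64 := by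
    rw [pvPadA_eq, hbl, hpad]
  rw [hpB]
  set pB := pvBits msg ++ ['1'] ++ List.replicate z '0' ++ pvBinFmt (8 * L) 64 with hpBdef
  have hpBlen : pB.length = 8 * L + 1 + z + 64 := by
    rw [hpBdef, List.length_append, List.length_append, List.length_append,
      pvBits_length msg hmb, pvBinFmt_length (8 * L) 64 h64 (by norm_num),
      List.length_replicate, hL]
    rfl
  have hpBbits : pvIsBits pB := by
    intro c hc
    rw [hpBdef] at hc
    rcases List.mem_append.mp hc with hc | hc
    · rcases List.mem_append.mp hc with hc | hc
      · rcases List.mem_append.mp hc with hc | hc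
        · exact pvBits_isBits msg c hc
        · simp at hc; simp [hc]
      · left; exact List.eq_of_mem_replicate hc
    · exact pvBinFmt_isBits (8 * L) 64 c hc
  set B := (8 * L + 1 + z + 64) / 512 with hBdef
  have hBlen : pB.length = 512 * B := by
    rw [hpBlen, hBdef]
    omega
  -- B's big integer is the parse of A's padded bit string
  have hn : data.toList.foldl (fun n c => (n <<< 8) ||| c.toNat) 0 = pvParseBin (pvBits msg) := by
    rw [pvBits_parse msg hmb, hmsg, List.foldl_map]
    apply PySem.List.foldl_congr_mem
    intro acc x hx
    have hxb : x.toNat < 256 := by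
      have := hmb x.toNat (by rw [hmsg]; exact List.mem_map.mpr ⟨x, hx, rfl⟩)
      omega
    rw [Nat.shiftLeft_eq, pvOrDisj (acc * 2 ^ 8) x.toNat 8 ⟨acc, by ring⟩ hxb]
    ring
  rw [hn]
  have hpadded : (((pvParseBin (pvBits msg) <<< 1) ||| 1) <<< (z + 64)) |||
      ((8 * L) &&& ((1 <<< 64) - 1)) = pvParseBin pB := by
    rw [show (1 <<< 64) - 1 = 2 ^ 64 - 1 from by rw [Nat.shiftLeft_eq, Nat.one_mul],
      Nat.and_two_pow_sub_one_eq_mod, Nat.mod_eq_of_lt h64,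
      Nat.shiftLeft_eq (pvParseBin (pvBits msg)) 1,
      pvOrDisj (pvParseBin (pvBits msg) * 2 ^ 1) 1 1 ⟨pvParseBin (pvBits msg), by ring⟩
        (by norm_num),
      Nat.shiftLeft_eq _ (z + 64),
      pvOrDisj _ (8 * L) 64
        ⟨(pvParseBin (pvBits msg) * 2 ^ 1 + 1) * 2 ^ z, by rw [pow_add]; ring⟩ h64,
      hpBdef, pvParseBin_append, pvParseBin_append,
      pvBinFmt_length (8 * L) 64 h64 (by norm_num), pvBinFmt_parse,
      pvParseBin_replicate_zero, List.length_replicate, pvParseBin_append,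
      show pvParseBin ['1'] = 1 from rfl,
      show (['1'] : List Char).length = 1 from rfl, pow_add]
    ring
  rw [hpadded]
  -- the block loops agree
  have hblocks := pvBlocks_corr (pvParseBin pB) pB B hpBbits hBlen rfl B (le_refl B)
    (0x67452301, 0xEFCDAB89, 0x98BADCFE, 0x10325476, 0xC3D2E1F0)
  simp only [Nat.sub_self, Nat.zero_add, pvToList] at hblocks
  rw [hblocks, pvChunksA_eq pB 512 B (by norm_num) (by rw [hBlen]; ring)]
  -- the two hexadecimal renderings agree
  set hs := ((List.range B).map (fun k => (pB.drop (512 * k)).take 512)).foldl pvBlockA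
    (0x67452301, 0xEFCDAB89, 0x98BADCFE, 0x10325476, 0xC3D2E1F0) with hhs
  have hbd : pvBounded hs := by
    rw [hhs]
    exact pvFold_bounded _ _ (by norm_num [pvBounded])
  obtain ⟨b0, b1, b2, b3, b4⟩ := hbd
  exact congrArg String.ofList
    (pvHex40 hs.1 hs.2.1 hs.2.2.1 hs.2.2.2.1 hs.2.2.2.2 b0 b1 b2 b3 b4).symm
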